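-- pv_equiv track=rewrite | github.com/yz4004/codeforce-python | daily/problem_list/2025/0505.py | solve
-- ===== SOURCE A (Python) =====
-- mx = lambda x, y: x if x > y else y
--
-- def solve(s:str, t:str) -> int:
--     m, n = len(s), len(t)
--     res = 0
--     # t[i:] 在 s中出现的最长子序列
--     for i in range(n):
--         k = 0
--         for j in range(m):
--             if t[i+k] == s[j]:
--                 k += 1
--                 if i+k == n:
--                     break
--         res = mx(res, k)
--     return m + n - res
-- ===== SOURCE B (Python) =====
-- def solve(s: str, t: str) -> int:
--     # Precomputed next-occurrence table: nxt[p] maps each character c to the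
--     # smallest index q >= p with s[q] == c (built once by a backward scan of s).
--     # Each start i of t is then matched greedily by table lookups alone.
--     m, n = len(s), len(t)
--     nxt = [None] * (m + 1)
--     nxt[m] = {}
--     for p in range(m - 1, -1, -1):
--         d = dict(nxt[p + 1])
--         d[s[p]] = p
--         nxt[p] = d
--     best = 0
--     for i in range(n):
--         p = 0
--         k = 0
--         while i + k < n:
--             q = nxt[p].get(t[i + k])
--             if q is None:
--                 break
--             k += 1
--             p = q + 1
--         if k > best:
--             best = k
--     return m + n - best
-- ===== Notes on version B (the rewrite author's own statement) =====
-- stated objective: faster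
-- what changed: A rescans all of s character by character for every start i of t; B first builds a next-occurrence table nxt[p][c] (smallest index >= p of c in s) by a single backward pass over s, then matches each start of t purely by O(1) table lookups, so the per-start O(m) scan of s disappears from the query phase.
import Mathlib
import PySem

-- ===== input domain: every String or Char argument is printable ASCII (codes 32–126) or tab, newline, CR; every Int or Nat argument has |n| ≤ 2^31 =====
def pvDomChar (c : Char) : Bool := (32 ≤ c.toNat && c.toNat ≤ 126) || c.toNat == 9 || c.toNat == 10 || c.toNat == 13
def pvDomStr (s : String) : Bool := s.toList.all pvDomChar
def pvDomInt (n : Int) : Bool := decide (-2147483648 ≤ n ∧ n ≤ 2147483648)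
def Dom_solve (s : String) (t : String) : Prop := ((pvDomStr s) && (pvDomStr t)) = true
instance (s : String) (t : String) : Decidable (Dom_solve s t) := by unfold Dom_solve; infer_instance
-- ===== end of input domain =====

-- B precomputes a next-occurrence table over s (backward scan) and matches each
-- start of t by table lookups alone, removing A's per-start scan over s.

-- ===== PORT A =====
-- mx = lambda x, y: x if x > y else y
def mxA (x y : Nat) : Nat := if x > y then x else y

-- inner 'for j in range(m)' loop of A: scans s char by char, k = matched count;
-- breaks as soon as i + k == n.  (t[i+k]? = none is unreachable: the break keeps
-- i + k < n = len(t) whenever t[i+k] is read, so Python never raises here.)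
def innerA (t : List Char) (n i : Nat) : List Char → Nat → Nat
  | [], k => k
  | c :: srest, k =>
    match t[i + k]? with
    | none => k
    | some x =>
      if x = c then
        (if i + (k + 1) = n then k + 1 else innerA t n i srest (k + 1))
      else innerA t n i srest k

def solve (s : String) (t : String) : Int :=
  let sl := s.toList
  let tl := t.toList
  let m := sl.length
  let n := tl.length
  let res := (List.range n).foldl (fun res i => mxA res (innerA tl n i sl 0)) 0
  (m : Int) + (n : Int) - (res : Int)

-- ===== PORT B =====
-- backward construction of the table: nxt[m] = {}, and for p = m-1 .. 0
-- nxt[p] = copy of nxt[p+1] with nxt[p][s[p]] = p.  Ported as structural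
-- recursion on the suffix of s, with p0 the absolute index of its first char;
-- the head of the recursive result is nxt[p0+1].
def buildNxt (p0 : Nat) : List Char → List (PySem.Dict Char Nat)
  | [] => [PySem.Dict.empty]
  | c :: rest =>
      let T := buildNxt (p0 + 1) rest
      ((T.headD PySem.Dict.empty).insert c p0) :: T

-- the 'while i + k < n' loop of B: p is the current table row, q = nxt[p].get(t[i+k]).
def walkT (nxt : List (PySem.Dict Char Nat)) (t : List Char) (n i : Nat) (p k : Nat) : Nat :=
  if _h : i + k < n then
    match t[i + k]? with
    | none => k
    | some c =>
      match nxt[p]? with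
      | none => k
      | some d =>
        match d.get? c with
        | none => k
        | some q => walkT nxt t n i (q + 1) (k + 1)
  else k
termination_by n - (i + k)
decreasing_by omega

def solve_alt (s : String) (t : String) : Int :=
  let sl := s.toList
  let tl := t.toList
  let m := sl.length
  let n := tl.length
  let nxt := buildNxt 0 sl
  let best := (List.range n).foldl
    (fun best i => let k := walkT nxt tl n i 0 0; if k > best then k else best) 0
  (m : Int) + (n : Int) - (best : Int)

-- ===== PRECONDITION & SPEC =====
def Spec_solve (s : String) (t : String) (out : Int) : Prop := out = solve_alt s t
instance (s : String) (t : String) (out : Int) : Decidable (Spec_solve s t out) := by unfold Spec_solve; infer_instance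

-- ===== CLAIM (what is proved, stated in full; the proofs are below) =====
def Claim_equal_solve : Prop := ∀ (s : String) (t : String), Dom_solve s t → Spec_solve s t (solve s t)

-- ===== LEMMAS AND PROOFS =====

-- the table always has at least one row
theorem buildNxt_ne_nil (p0 : Nat) (s : List Char) : buildNxt p0 s ≠ [] := by
  cases s <;> simp [buildNxt]

-- table characterisation: row j of the table for the suffix starting at absolute
-- index p0 sends c to p0 + j + (index of first occurrence of c in s.drop j)
theorem buildNxt_get (s : List Char) : ∀ (p0 j : Nat), j ≤ s.length →
    ∃ d, (buildNxt p0 s)[j]? = some d ∧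
      ∀ c, d.get? c = ((s.drop j).findIdx? (· = c)).map (fun r => p0 + j + r) := by
  induction s with
  | nil =>
    intro p0 j hj
    simp only [List.length_nil, Nat.le_zero] at hj
    subst hj
    exact ⟨PySem.Dict.empty, by simp [buildNxt], fun c => by simp [PySem.Dict.get?_empty]⟩
  | cons a rest ih =>
    intro p0 j hj
    cases j with
    | zero =>
      obtain ⟨d0, hd0, hget0⟩ := ih (p0 + 1) 0 (Nat.zero_le _)
      cases hb : buildNxt (p0 + 1) rest with
      | nil => exact absurd hb (buildNxt_ne_nil _ _)
      | cons d1 T' =>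
      have hd1 : d1 = d0 := by rw [hb] at hd0; simpa using hd0
      rw [hd1] at hb
      refine ⟨(d0.insert a p0), by simp [buildNxt, hb, List.headD], fun c => ?_⟩
      rw [PySem.Dict.get?_insert]
      by_cases hca : c = a
      · subst hca
        simp [List.findIdx?_cons]
      · rw [if_neg hca]
        rw [hget0 c]
        simp only [List.drop_zero] at *
        rw [List.findIdx?_cons]
        rw [if_neg (by simp [Ne.symm hca])]
        cases hf : rest.findIdx? (· = c) <;> simp [hf] <;> omega
    | succ j' =>
      obtain ⟨d0, hd0, hget0⟩ := ih (p0 + 1) j' (by simpa using hj)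
      refine ⟨d0, by simpa [buildNxt] using hd0, fun c => ?_⟩
      rw [hget0 c]
      simp only [List.drop_succ_cons]
      cases hf : (rest.drop j').findIdx? (· = c) <;> simp [hf] <;> omega

-- skipping: the sought character is absent from the unscanned part of s ⇒ A's scan never matches again
theorem innerA_of_not_mem (t : List Char) (n i : Nat) (c : Char) (u : List Char) (k : Nat)
    (ht : t[i + k]? = some c) (hc : c ∉ u) : innerA t n i u k = k := by
  induction u with
  | nil => simp [innerA]
  | cons d u' ih =>
    simp only [List.mem_cons, not_or] at hc
    simp only [innerA, ht]
    rw [if_neg (by exact hc.1)]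
    exact ih hc.2

-- matching: first occurrence at index j ⇒ A's scan skips to it, matches, continues after it
theorem innerA_of_findIdx (t : List Char) (n i : Nat) (c : Char) (u : List Char) (k j : Nat)
    (ht : t[i + k]? = some c) (hj : u.findIdx? (· = c) = some j) :
    innerA t n i u k =
      (if i + (k + 1) = n then k + 1 else innerA t n i (u.drop (j + 1)) (k + 1)) := by
  induction u generalizing j with
  | nil => simp at hj
  | cons d u' ih =>
    rw [List.findIdx?_cons] at hj
    by_cases hdc : d = c
    · simp [hdc] at hj
      subst hj
      simp only [innerA, ht, if_pos hdc.symm]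
      simp
    · have hdc' : ¬ decide (d = c) = true := by simp [hdc]
      rw [if_neg hdc'] at hj
      simp only [Option.map_eq_some_iff] at hj
      obtain ⟨j', hj', hjj⟩ := hj
      simp only [innerA, ht]
      rw [if_neg (fun h => hdc h.symm)]
      rw [ih j' hj']
      subst hjj
      simp [List.drop_succ_cons]

-- main correspondence: A's scan over the unscanned tail s.drop p equals B's table walk from row p
theorem innerA_eq_walkT (s t : List Char) (n i : Nat) (hn : n = t.length) :
    ∀ d p k, n - (i + k) ≤ d → p ≤ s.length → i + k < n →
      innerA t n i (s.drop p) k = walkT (buildNxt 0 s) t n i p k := by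
  intro d
  induction d with
  | zero => intro p k h1 _ h3; omega
  | succ d ih =>
    intro p k h1 hp h3
    have hc : ∃ c, t[i + k]? = some c := by
      have : i + k < t.length := by omega
      exact ⟨t[i + k], List.getElem?_eq_getElem this⟩
    obtain ⟨c, hc⟩ := hc
    obtain ⟨row, hrow, hget⟩ := buildNxt_get s 0 p hp
    rw [walkT]
    rw [dif_pos h3, hc]
    simp only [hrow]
    rw [hget c]
    cases hf : (s.drop p).findIdx? (· = c) with
    | none =>
      simp only [Option.map_none]
      refine innerA_of_not_mem t n i c (s.drop p) k hc ?_
      rw [List.findIdx?_eq_none_iff] at hf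
      intro hm; have := hf c hm; simp at this
    | some j =>
      have hjlen : j < (s.drop p).length := (List.findIdx?_eq_some_iff_getElem.mp hf).1
      simp only [Option.map_some]
      rw [innerA_of_findIdx t n i c (s.drop p) k j hc hf]
      by_cases hend : i + (k + 1) = n
      · rw [if_pos hend, walkT, dif_neg (by omega)]
      · rw [if_neg hend]
        rw [List.drop_drop]
        have := ih (0 + p + j + 1) (k + 1) (by omega) (by simp [List.length_drop] at hjlen; omega) (by omega)
        rw [← this]
        ring_nf

-- ===== VERDICT (by name: the statement is the Claim_ definition above) =====
theorem solve_spec : Claim_equal_solve := by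
  intro s t _
  unfold Spec_solve solve solve_alt
  simp only []
  congr 2
  apply PySem.List.foldl_congr_mem
  intro acc i hi
  have hi' : i < t.toList.length := List.mem_range.mp hi
  by_cases hn0 : i + 0 < t.toList.length
  · have h := innerA_eq_walkT s.toList t.toList t.toList.length i rfl t.toList.length 0 0 (by omega) (by simp) hn0
    simp only [List.drop_zero] at h
    simp only [mxA, h]
    split_ifs <;> omega
  · omega
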